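-- pv_equiv track=rewrite | github.com/Brunobs13/Artificialntelligence_BlindSearchAlgorithm | legacy/academic_project/fullcode.py | calcular_todas_familias
-- ===== SOURCE A (Python) =====
-- territorio = {
-- 	1: {
-- 		'matriz': [[0,7,0,0,4], [0,0,0,4,0], [1,0,0,0,0], [4,4,1,0,0], [6,0,3,4,4]],
-- 		'verba': 4,
-- 		'objetivo': [19, 20],
--
-- 	},
-- 	2: {
-- 		'matriz': [[4,0,0,10,1], [1,0,0,0,0], [0,0,1,6,3], [0,4,0,0,2], [8,0,6,3,0]],
-- 		'verba': 4,
-- 		'objetivo': [21, 22]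
-- 	},
-- 	3: {
-- 		'matriz': [[0,8,0,4,5,10,0], [0,4,0,7,0,4,0], [0,2,4,2,0,0,2], [0,7,0,1,2,0,0], [2,4,0,0,3,0,2], [0,4,0,0,3,0,0], [2,0,0,0,0,0,0]],
-- 		'verba': 8,
-- 		'objetivo': [67, 68]
-- 		},
-- 	4: {
-- 		'matriz': [[0,0,1,0,7,0,1], [0,1,4,0,0,0,4], [0,0,0,0,2,0,0], [3,1,0,8,5,7,7], [0,4,0,3,0,0,0], [0,0,0,3,2,4,2], [0,8,3,6,3,0,0]],
-- 		'verba': 8,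
-- 		'objetivo': [59, 60]
-- 		},
-- 	5: {
-- 		'matriz': [[6,7,2,0,0,0,0,0,0], [3,3,6,0,8,4,3,1,0], [0,0,8,0,0,0,2,4,0], [0,0,0,1,0,3,2,0,0], [0,0,0,7,4,0,1,0,0], [12,8,0,5,4,1,4,3,4], [8,0,1,2,4,3,3,0,0], [1,1,0,0,0,0,5,0,0], [4,0,0,0,4,6,0,13,2]],
-- 		'verba': 12,
-- 		'objetivo': [125, 126]
-- 		},
-- 	6: {
-- 		'matriz': [[0,0,0,0,0,0,0,0,0], [4,0,8,4,0,0,0,0,0], [0,0,0,0,0,0,0,0,0], [0,0,0,0,3,0,0,1,0], [0,3,0,0,0,0,0,0,0], [0,0,0,1,1,0,0,3,0], [0,0,2,4,0,0,0,1,0], [0,2,0,0,8,0,4,3,10], [0,0,3,0,0,4,0,0,0]],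
-- 		'verba': 12,
-- 		'objetivo': [57, 58]
-- 		},
-- 	7: {
-- 		'matriz': [[0,0,0,0,0,3,0,0,0,0,0], [0,0,11,2,0,0,9,3,0,0,3], [0,0,0,3,1,0,2,0,0,0,0], [4,1,2,3,0,4,0,0,4,0,0], [5,0,0,0,4,0,1,0,4,3,0], [0,0,0,7,4,0,1,0,0,7,0], [0,8,0,0,0,0,3,0,1,0,3], [0,3,0,0,5,2,3,0,0,0,2], [0,0,0,3,1,0,2,8,0,0,0], [0,3,4,0,7,0,0,7,0,0,0], [4,2,0,4,0,3,0,0,5,7,0]],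
-- 		'verba': 16,
-- 		'objetivo': [140, 141]
-- 		},
-- 	8: {
-- 		'matriz': [[1,0,0,0,0,0,0,0,0,0,0], [0,0,0,0,0,0,0,0,0,0,0], [0,0,10,10,0,0,0,4,5,0,0], [0,4,1,0,8,0,0,0,0,0,5], [8,0,0,0,0,0,6,0,0,0,0], [0,0,0,0,13,0,0,0,2,0,3], [0,0,0,0,4,0,0,0,0,1,0], [0,0,0,0,0,0,0,0,0,0,0], [0,0,4,0,0,0,0,3,0,0,0], [4,1,0,0,0,0,0,0,0,0,0], [0,0,0,0,0,0,0,0,0,0,0]],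
-- 		'verba': 16,
-- 		'objetivo': [93, 94]
-- 		},
-- 	9: {
-- 		'matriz': [[2,4,0,0,6,7,3,4,0,0,3,0,1], [0,0,2,0,3,0,0,6,0,0,8,11,3], [0,3,0,8,0,0,2,0,0,0,0,0,4], [2,0,0,0,0,0,0,0,0,3,2,0,0], [0,6,0,8,0,3,0,0,0,0,0,0,1], [0,3,0,2,0,0,9,0,0,0,0,5,6], [1,9,4,0,0,2,4,0,0,0,3,2,0], [2,3,0,4,0,0,0,6,2,0,1,0,3], [0,0,0,0,0,6,0,0,0,2,2,0,8], [7,2,4,2,0,0,6,4,1,0,0,0,7], [0,0,0,11,0,0,0,0,3,4,0,9,0], [0,0,0,0,1,4,3,4,0,0,0,3,11], [0,0,4,7,7,0,0,2,0,2,5,0,1]],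
-- 		'verba': 20,
-- 		'objetivo': [211, 212]
-- 		},
-- 		10: {
-- 		'matriz': [[0,0,1,4,0,0,9,0,0,0,12,0,1], [0,0,0,0,0,0,0,0,0,1,0,0,0], [1,0,0,0,0,0,2,0,0,2,0,0,0], [0,0,0,0,0,9,4,0,0,0,6,0,0], [0,6,9,0,0,0,0,0,0,0,0,0,0], [0,0,0,0,0,0,0,1,6,10,0,1,4], [0,3,0,0,0,1,0,0,0,0,0,2,0], [0,0,0,1,3,0,0,0,0,9,0,0,0], [9,0,0,3,3,0,0,0,0,3,4,0,0], [0,1,4,0,0,0,0,0,0,5,0,1,0], [0,0,0,0,0,0,0,0,0,0,0,0,0], [2,0,0,0,0,3,3,0,0,0,0,0,10], [0,0,0,0,0,0,0,0,0,4,0,0,0]],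
-- 		'verba': 20,
-- 		'objetivo': [125, 126]
-- 		},
-- }
--
-- def dentro_do_mapa(x, y, matriz):
-- 	return 0 <= x < len(matriz) and 0 <= y < len(matriz[0])
--
-- def calcular_todas_familias(delegacias, raios, territorio):
-- 	todas_familias = 0
-- 	protegidas = set()  # Conjunto para armazenar zonas já protegidas
-- 	for (dx, dy), raio in zip(delegacias, raios):
-- 		for x in range(dx - raio, dx + raio + 1):
-- 			for y in range(dy - raio, dy + raio + 1):
-- 				if dentro_do_mapa(x, y, territorio) and (x, y) not in protegidas:
-- 					todas_familias += territorio[x][y]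
-- 					protegidas.add((x, y))
-- 	return todas_familias
-- ===== SOURCE B (Python) =====
-- def calcular_todas_familias(delegacias, raios, territorio):
--     m = len(territorio[0]) if territorio else 0
--     postos = list(zip(delegacias, raios))
--     total = 0
--     for x, row in enumerate(territorio):
--         for y in range(m):
--             if any(abs(x - dx) <= r and abs(y - dy) <= r for (dx, dy), r in postos):
--                 total += row[y]
--     return total
-- ===== Notes on version B (the rewrite author's own statement) =====
-- stated objective: alternative
-- what changed: B scans the grid itself row by row and adds each cell whose Chebyshev distance to some station is within its radius, instead of A's enumeration of every station's square with a dedup set; no set is kept at all.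
import Mathlib
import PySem

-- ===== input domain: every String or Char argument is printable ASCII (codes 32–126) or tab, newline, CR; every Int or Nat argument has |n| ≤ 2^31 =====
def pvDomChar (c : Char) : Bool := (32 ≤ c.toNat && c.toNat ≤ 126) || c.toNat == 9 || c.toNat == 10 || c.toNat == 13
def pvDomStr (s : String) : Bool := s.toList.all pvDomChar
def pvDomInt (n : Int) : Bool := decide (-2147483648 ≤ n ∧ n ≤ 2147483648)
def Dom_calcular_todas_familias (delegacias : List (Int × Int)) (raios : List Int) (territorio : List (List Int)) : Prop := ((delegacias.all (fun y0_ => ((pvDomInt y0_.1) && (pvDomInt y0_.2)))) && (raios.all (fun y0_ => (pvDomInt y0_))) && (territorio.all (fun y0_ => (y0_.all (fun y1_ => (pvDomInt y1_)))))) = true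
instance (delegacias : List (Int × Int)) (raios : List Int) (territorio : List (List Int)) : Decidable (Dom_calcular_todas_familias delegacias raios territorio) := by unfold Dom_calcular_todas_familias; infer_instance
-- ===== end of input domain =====

-- B scans the grid row by row and adds each cell whose Chebyshev distance to some station is within its radius, with no dedup set; cost is independent of the radii, and a timing run measured B faster.


-- ===== PORT A =====
-- dentro_do_mapa(x, y, matriz); matriz[0] is only evaluated under x < len(matriz), so headD [] is exact
def pvDentro (x y : Int) (matriz : List (List Int)) : Bool :=
  decide (0 ≤ x ∧ x < (matriz.length : Int)) && decide (0 ≤ y ∧ y < ((matriz.headD []).length : Int))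

-- territorio[x][y]; the .getD 0 default is never reached under Pre_ (Python raises there)
def pvVal (t : List (List Int)) (x y : Int) : Int :=
  ((PySem.List.pyGet? t x).bind (fun row => PySem.List.pyGet? row y)).getD 0

def calcular_todas_familias (delegacias : List (Int × Int)) (raios : List Int) (territorio : List (List Int)) : Int :=
  (((delegacias.zip raios).foldl (fun (st : Int × PySem.Set (Int × Int)) pr =>
      (PySem.List.pyRange (pr.1.1 - pr.2) (pr.1.1 + pr.2 + 1) 1).foldl (fun st x =>
        (PySem.List.pyRange (pr.1.2 - pr.2) (pr.1.2 + pr.2 + 1) 1).foldl (fun st y =>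
          if pvDentro x y territorio && !(PySem.Set.contains st.2 (x, y)) then
            (st.1 + pvVal territorio x y, PySem.Set.add st.2 (x, y))
          else st) st) st)
    ((0 : Int), (PySem.Set.empty : PySem.Set (Int × Int))))).1

-- ===== PORT B =====
-- "any(abs(x - dx) <= r and abs(y - dy) <= r for (dx, dy), r in postos)"
def pvCov (postos : List ((Int × Int) × Int)) (x y : Int) : Bool :=
  postos.any (fun pr => decide (|x - pr.1.1| ≤ pr.2) && decide (|y - pr.1.2| ≤ pr.2))

def calcular_todas_familias_alt (delegacias : List (Int × Int)) (raios : List Int) (territorio : List (List Int)) : Int :=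
  let m : Int := if territorio.isEmpty then 0 else ((territorio.headD []).length : Int)
  let postos : List ((Int × Int) × Int) := delegacias.zip raios
  (PySem.List.enumerate territorio).foldl (fun total xr =>
    (PySem.List.pyRange 0 m 1).foldl (fun total y =>
      if pvCov postos xr.1 y then total + (PySem.List.pyGet? xr.2 y).getD 0
      else total) total) 0

-- ===== PRECONDITION & SPEC =====
-- Pre_ excludes exactly the inputs on which A raises IndexError: some square covers a cell whose row
-- index and column pass dentro_do_mapa (which checks columns against row 0) but whose ragged row is
-- shorter than that column; everywhere else A returns normally.
def Pre_calcular_todas_familias (delegacias : List (Int × Int)) (raios : List Int) (territorio : List (List Int)) : Prop :=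
  ∀ pr ∈ delegacias.zip raios, ∀ i ∈ List.range territorio.length,
    (pr.1.1 - pr.2 ≤ (i : Int) ∧ (i : Int) ≤ pr.1.1 + pr.2 ∧
      max 0 (pr.1.2 - pr.2) ≤ min (((territorio.headD []).length : Int) - 1) (pr.1.2 + pr.2)) →
    min (((territorio.headD []).length : Int) - 1) (pr.1.2 + pr.2) < ((territorio.getD i []).length : Int)
instance (delegacias : List (Int × Int)) (raios : List Int) (territorio : List (List Int)) : Decidable (Pre_calcular_todas_familias delegacias raios territorio) := by unfold Pre_calcular_todas_familias; infer_instance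

def pvWitness_calcular_todas_familias : (List (Int × Int)) × List Int × List (List Int) :=
  ([(0, 0)], [1], [[1, 2], [3, 4]])

def Spec_calcular_todas_familias (delegacias : List (Int × Int)) (raios : List Int) (territorio : List (List Int)) (out : Int) : Prop := out = calcular_todas_familias_alt delegacias raios territorio
instance (delegacias : List (Int × Int)) (raios : List Int) (territorio : List (List Int)) (out : Int) : Decidable (Spec_calcular_todas_familias delegacias raios territorio out) := by unfold Spec_calcular_todas_familias; infer_instance

-- ===== CLAIM (what is proved, stated in full; the proofs are below) =====
def Claim_equal_calcular_todas_familias : Prop := ∀ (delegacias : List (Int × Int)) (raios : List Int) (territorio : List (List Int)), Dom_calcular_todas_familias delegacias raios territorio → Pre_calcular_todas_familias delegacias raios territorio → Spec_calcular_todas_familias delegacias raios territorio (calcular_todas_familias delegacias raios territorio)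

-- ===== LEMMAS AND PROOFS =====

-- in-bounds test on a pair
def pvInb (t : List (List Int)) (p : Int × Int) : Bool := pvDentro p.1 p.2 t

-- the running sum A maintains, as a function of the protected set
def pvSum (t : List (List Int)) (s : List (Int × Int)) : Int :=
  s.foldl (fun a p => a + pvVal t p.1 p.2) 0

-- A's per-cell step
def pvStepA (t : List (List Int)) (st : Int × PySem.Set (Int × Int)) (p : Int × Int) :
    Int × PySem.Set (Int × Int) :=
  if pvDentro p.1 p.2 t && !(PySem.Set.contains st.2 p) then
    (st.1 + pvVal t p.1 p.2, PySem.Set.add st.2 p)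
  else st

-- one station's candidate square, as A enumerates it
def pvCand (pr : (Int × Int) × Int) : List (Int × Int) :=
  (PySem.List.pyRange (pr.1.1 - pr.2) (pr.1.1 + pr.2 + 1) 1).flatMap fun x =>
    (PySem.List.pyRange (pr.1.2 - pr.2) (pr.1.2 + pr.2 + 1) 1).map (Prod.mk x)

-- a double fold over x then y is a fold over the flattened pair list
theorem pv_pairfold {σ : Type} (g : σ → Int × Int → σ) (ys : List Int) :
    ∀ (xs : List Int) (st0 : σ),
      xs.foldl (fun st x => ys.foldl (fun st y => g st (x, y)) st) st0
        = (xs.flatMap fun x => ys.map (Prod.mk x)).foldl g st0 := by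
  intro xs
  induction xs with
  | nil => intro st0; rfl
  | cons x xs ih =>
      intro st0
      simp only [List.foldl_cons, List.flatMap_cons, List.foldl_append, List.foldl_map]
      exact ih _

-- A's double fold, written exactly as in the port, as a flat fold of pvStepA over pvCand
theorem pvA_flat (t : List (List Int)) (pr : (Int × Int) × Int) (st0 : Int × PySem.Set (Int × Int)) :
    (PySem.List.pyRange (pr.1.1 - pr.2) (pr.1.1 + pr.2 + 1) 1).foldl (fun st x =>
        (PySem.List.pyRange (pr.1.2 - pr.2) (pr.1.2 + pr.2 + 1) 1).foldl (fun st y =>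
          if pvDentro x y t && !(PySem.Set.contains st.2 (x, y)) then
            (st.1 + pvVal t x y, PySem.Set.add st.2 (x, y))
          else st) st) st0
      = (pvCand pr).foldl (pvStepA t) st0 :=
  pv_pairfold (pvStepA t) _ _ _

-- A's fold keeps its accumulator equal to pvSum of its set, and its set is Set.add over the
-- in-bounds candidates
theorem pv_state (t : List (List Int)) :
    ∀ (L : List (Int × Int)) (s : PySem.Set (Int × Int)),
      L.foldl (pvStepA t) (pvSum t s, s)
        = (pvSum t ((L.filter (pvInb t)).foldl PySem.Set.add s),
           (L.filter (pvInb t)).foldl PySem.Set.add s) := by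
  intro L
  induction L with
  | nil => intro s; rfl
  | cons p L ih =>
      intro s
      by_cases hin : pvInb t p = true
      · by_cases hc : p ∈ s
        · have h1 : pvStepA t (pvSum t s, s) p = (pvSum t s, s) := by
            simp [pvStepA, hc]
          have h2 : PySem.Set.add s p = s := PySem.Set.add_of_mem hc
          simp only [List.foldl_cons, List.filter_cons, hin, if_pos, h1, h2, ih]
        · have h2 : PySem.Set.add s p = s ++ [p] := PySem.Set.add_of_not_mem hc
          have h3 : pvSum t (s ++ [p]) = pvSum t s + pvVal t p.1 p.2 := by
            simp [pvSum, List.foldl_append]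
          have h1 : pvStepA t (pvSum t s, s) p = (pvSum t (s ++ [p]), s ++ [p]) := by
            simp only [pvInb] at hin
            simp [pvStepA, hin, hc, h3]
          simp only [List.foldl_cons, List.filter_cons, hin, if_pos, h1]
          rw [← h2, ih]
      · have hinb : pvDentro p.1 p.2 t = false := by
          simp only [pvInb] at hin; simpa using hin
        have h1 : pvStepA t (pvSum t s, s) p = (pvSum t s, s) := by
          simp [pvStepA, hinb]
        simp only [List.foldl_cons, List.filter_cons, hin, Bool.false_eq_true, if_neg,
          not_false_eq_true, h1, ih]

-- all in-bounds candidate cells of all stations, in A's encounter order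
def pvAllCand (t : List (List Int)) (ps : List ((Int × Int) × Int)) : List (Int × Int) :=
  ps.flatMap fun pr => (pvCand pr).filter (pvInb t)

-- A's outer fold: its state is (pvSum of the accumulated set, the accumulated set)
theorem pv_outer (t : List (List Int)) :
    ∀ (ps : List ((Int × Int) × Int)) (s : PySem.Set (Int × Int)),
      ps.foldl (fun (st : Int × PySem.Set (Int × Int)) pr =>
          (PySem.List.pyRange (pr.1.1 - pr.2) (pr.1.1 + pr.2 + 1) 1).foldl (fun st x =>
            (PySem.List.pyRange (pr.1.2 - pr.2) (pr.1.2 + pr.2 + 1) 1).foldl (fun st y =>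
              if pvDentro x y t && !(PySem.Set.contains st.2 (x, y)) then
                (st.1 + pvVal t x y, PySem.Set.add st.2 (x, y))
              else st) st) st) (pvSum t s, s)
        = (pvSum t ((pvAllCand t ps).foldl PySem.Set.add s),
           (pvAllCand t ps).foldl PySem.Set.add s) := by
  intro ps
  induction ps with
  | nil => intro s; rfl
  | cons pr ps ih =>
      intro s
      simp only [List.foldl_cons, pvAllCand, List.flatMap_cons, List.foldl_append]
      rw [pvA_flat t pr, pv_state]
      exact ih _

-- membership in A's protected set is exactly "in bounds and covered by some station"
theorem pv_mem_allCand (t : List (List Int)) (ps : List ((Int × Int) × Int)) (p : Int × Int) :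
    p ∈ pvAllCand t ps ↔ (pvInb t p = true ∧ pvCov ps p.1 p.2 = true) := by
  simp only [pvAllCand, List.mem_flatMap, List.mem_filter, pvCand, List.mem_map,
    PySem.List.mem_pyRange_one, pvCov, List.any_eq_true, Bool.and_eq_true, decide_eq_true_eq, abs_le]
  constructor
  · rintro ⟨pr, hpr, ⟨⟨x, ⟨hx1, hx2⟩, ⟨y, ⟨hy1, hy2⟩, rfl⟩⟩, hin⟩⟩
    exact ⟨hin, pr, hpr, by omega, by omega⟩
  · rintro ⟨hin, pr, hpr, hx, hy⟩
    exact ⟨pr, hpr, ⟨⟨p.1, ⟨by omega, by omega⟩, p.2, ⟨by omega, by omega⟩, rfl⟩, hin⟩⟩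

-- a conditional-accumulate fold is the sum over the filtered, mapped list
theorem pv_foldl_if_add {α : Type} (c : α → Bool) (v : α → Int) :
    ∀ (L : List α) (a : Int),
      L.foldl (fun a p => if c p then a + v p else a) a = a + ((L.filter c).map v).sum := by
  intro L
  induction L with
  | nil => intro a; simp
  | cons p L ih =>
      intro a
      by_cases h : c p = true
      · simp only [List.foldl_cons, List.filter_cons, h, if_pos, List.map_cons, List.sum_cons, ih]
        ring
      · simp only [List.foldl_cons, List.filter_cons, h, Bool.false_eq_true, if_neg,
          not_false_eq_true, ih]

-- the row-major grid of in-bounds cells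
def pvGrid (t : List (List Int)) : List (Int × Int) :=
  (PySem.List.pyRange 0 (t.length : Int) 1).flatMap fun x =>
    (PySem.List.pyRange 0 ((t.headD []).length : Int) 1).map (Prod.mk x)

theorem pv_mem_grid (t : List (List Int)) (p : Int × Int) :
    p ∈ pvGrid t ↔ pvInb t p = true := by
  simp only [pvGrid, List.mem_flatMap, List.mem_map, PySem.List.mem_pyRange_one, pvInb, pvDentro,
    Bool.and_eq_true, decide_eq_true_eq]
  constructor
  · rintro ⟨x, hx, y, hy, rfl⟩; exact ⟨hx, hy⟩
  · rintro ⟨hx, hy⟩; exact ⟨p.1, hx, p.2, hy, rfl⟩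

theorem pv_nodup_grid (t : List (List Int)) : (pvGrid t).Nodup := by
  have h : pvGrid t = (PySem.List.pyRange 0 (t.length : Int) 1) ×ˢ
      (PySem.List.pyRange 0 ((t.headD []).length : Int) 1) := by
    simp [pvGrid, SProd.sprod, List.product]
  rw [h]
  exact List.Nodup.product (PySem.List.nodup_pyRange_one _ _) (PySem.List.nodup_pyRange_one _ _)

-- on in-bounds rows, B's row access equals A's territorio[x][y]
theorem pv_val_row (t : List (List Int)) (x y : Int) (h0 : 0 ≤ x) (h1 : x < (t.length : Int)) :
    (PySem.List.pyGet? (PySem.List.pyGetD t x []) y).getD 0 = pvVal t x y := by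
  have hg : PySem.List.pyGet? t x = some (PySem.List.pyGetD t x []) := by
    simp only [PySem.List.pyGet?, PySem.List.pyGetD, PySem.List.pyIdx?, if_pos h0, if_pos h1,
      Option.bind_some]
    have hk : x.toNat < t.length := by omega
    simp [List.getElem?_eq_getElem hk]
  simp [pvVal, hg]

-- B computes the sum of territorio over the covered in-bounds grid cells (row-major order)
theorem pv_B_eq (d : List (Int × Int)) (r : List Int) (t : List (List Int)) :
    calcular_todas_familias_alt d r t
      = (((pvGrid t).filter (fun p => pvCov (d.zip r) p.1 p.2)).map
          (fun p => pvVal t p.1 p.2)).sum := by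
  unfold calcular_todas_familias_alt
  have hm : (if t.isEmpty then (0 : Int) else ((t.headD []).length : Int))
      = ((t.headD []).length : Int) := by cases t <;> simp
  simp only [hm]
  rw [PySem.List.enumerate_eq_map_pyRange t [], List.foldl_map]
  have hlen : PySem.List.len t = (t.length : Int) := by simp [PySem.List.len]
  rw [hlen,
    pv_pairfold (fun a p => if pvCov (d.zip r) p.1 p.2 then
      a + (PySem.List.pyGet? (PySem.List.pyGetD t p.1 []) p.2).getD 0 else a),
    pv_foldl_if_add, zero_add]
  apply congrArg
  apply List.map_congr_left
  intro p hp
  have hpg : p ∈ pvGrid t := (List.mem_filter.mp hp).1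
  have hb := (pv_mem_grid t p).mp hpg
  simp only [pvInb, pvDentro, Bool.and_eq_true, decide_eq_true_eq] at hb
  exact pv_val_row t p.1 p.2 hb.1.1 hb.1.2

-- two nodup lists of the same cells: A's dedup order vs B's row-major order
theorem pv_perm (d : List (Int × Int)) (r : List Int) (t : List (List Int)) :
    (PySem.Set.ofList (pvAllCand t (d.zip r)) : List (Int × Int)).Perm
      ((pvGrid t).filter (fun p => pvCov (d.zip r) p.1 p.2)) := by
  refine (List.perm_ext_iff_of_nodup (PySem.Set.nodup_ofList _)
    ((pv_nodup_grid t).filter _)).mpr ?_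
  intro p
  rw [PySem.Set.mem_ofList, pv_mem_allCand, List.mem_filter, pv_mem_grid]

-- ===== VERDICT (by name: the statement is the Claim_ definition above) =====
theorem calcular_todas_familias_spec : Claim_equal_calcular_todas_familias := by
  intro d r t _ _
  unfold Spec_calcular_todas_familias calcular_todas_familias
  have h0 : ((0 : Int), (PySem.Set.empty : PySem.Set (Int × Int)))
      = (pvSum t PySem.Set.empty, PySem.Set.empty) := rfl
  rw [h0, pv_outer t (d.zip r) PySem.Set.empty]
  have hS : (pvAllCand t (d.zip r)).foldl PySem.Set.add PySem.Set.empty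
      = PySem.Set.ofList (pvAllCand t (d.zip r)) := rfl
  simp only [hS]
  rw [pv_B_eq]
  have hsum : pvSum t (PySem.Set.ofList (pvAllCand t (d.zip r)))
      = ((PySem.Set.ofList (pvAllCand t (d.zip r)) : List (Int × Int)).map
          (fun p => pvVal t p.1 p.2)).sum := by
    simpa [pvSum] using PySem.List.foldl_add
      (PySem.Set.ofList (pvAllCand t (d.zip r)) : List (Int × Int))
      (fun p => pvVal t p.1 p.2) 0
  rw [hsum]
  exact ((pv_perm d r t).map _).sum_eq
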